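-- pv_equiv track=rewrite | github.com/DevOpsMadDog/Fixops | lib4sbom/normalizer.py | _identity_for
-- ===== SOURCE A (Python) =====
-- from typing import (
--     Any,
--     Dict,
--     Iterable,
--     List,
--     Mapping,
--     MutableMapping,
--     Optional,
--     Sequence,
--     Tuple,
-- )
--
-- PREFERRED_HASH_ORDER = (
--     "SHA512",
--     "SHA384",
--     "SHA256",
--     "SHA224",
--     "SHA1",
--     "MD5",
-- )
--
-- def _identity_for(
--     purl: Optional[str], version: Optional[str], hashes: Mapping[str, str]
-- ) -> Tuple[str, str, str]:
--     preferred_hash = ""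
--     if hashes:
--         for algorithm in PREFERRED_HASH_ORDER:
--             if algorithm in hashes:
--                 preferred_hash = f"{algorithm}:{hashes[algorithm]}"
--                 break
--         else:
--             sorted_hashes = sorted(hashes.items())
--             if sorted_hashes:
--                 algorithm, value = sorted_hashes[0]
--                 preferred_hash = f"{algorithm}:{value}"
--     if purl and version:
--         return (purl, version, "")
--     if purl:
--         return (purl, "", preferred_hash)
--     if preferred_hash:
--         return ("", "", preferred_hash)
--     return ("", version or "", "")
-- ===== SOURCE B (Python) =====
-- PREFERRED_HASH_ORDER = (
--     "SHA512",
--     "SHA384",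
--     "SHA256",
--     "SHA224",
--     "SHA1",
--     "MD5",
-- )
--
-- def _identity_for(purl, version, hashes):
--     preferred_hash = ""
--     if hashes:
--         algorithm, value = min(
--             hashes.items(),
--             key=lambda kv: (
--                 PREFERRED_HASH_ORDER.index(kv[0])
--                 if kv[0] in PREFERRED_HASH_ORDER
--                 else len(PREFERRED_HASH_ORDER),
--                 kv[0],
--             ),
--         )
--         preferred_hash = f"{algorithm}:{value}"
--     if purl and version:
--         return (purl, version, "")
--     if purl:
--         return (purl, "", preferred_hash)
--     if preferred_hash:
--         return ("", "", preferred_hash)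
--     return ("", version or "", "")
-- ===== Notes on version B (the rewrite author's own statement) =====
-- stated objective: simpler
-- what changed: The two-phase hash selection (a for/break loop over PREFERRED_HASH_ORDER plus a sort-and-take-head fallback) is replaced by a single min() over hashes.items() with the composite key (preference rank or sentinel, algorithm name); the return cascade is unchanged.
import Mathlib
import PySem

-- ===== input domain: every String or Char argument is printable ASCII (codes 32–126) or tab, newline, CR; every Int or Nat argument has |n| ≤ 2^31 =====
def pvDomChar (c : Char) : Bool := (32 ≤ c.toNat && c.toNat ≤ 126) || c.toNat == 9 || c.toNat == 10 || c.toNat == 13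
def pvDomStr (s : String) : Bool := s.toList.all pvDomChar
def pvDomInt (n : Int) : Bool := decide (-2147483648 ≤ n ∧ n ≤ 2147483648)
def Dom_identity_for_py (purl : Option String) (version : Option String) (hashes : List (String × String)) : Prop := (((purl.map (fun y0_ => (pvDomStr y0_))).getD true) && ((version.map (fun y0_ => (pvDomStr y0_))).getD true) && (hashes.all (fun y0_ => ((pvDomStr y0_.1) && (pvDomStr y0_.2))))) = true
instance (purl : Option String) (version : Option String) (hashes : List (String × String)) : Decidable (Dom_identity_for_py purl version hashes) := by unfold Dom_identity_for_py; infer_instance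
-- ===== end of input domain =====

-- B replaces A's two-phase preferred-hash selection (for/break loop over PREFERRED_HASH_ORDER
-- plus a sort-and-take-head fallback) by one min() over the items with key (rank, name): simpler.

-- ===== PORT A =====
def pvOrder : List String := ["SHA512", "SHA384", "SHA256", "SHA224", "SHA1", "MD5"]

-- the for/else loop: first preferred algorithm present wins, else head of sorted items
def pvAFind (d : PySem.Dict String String) (hashes : List (String × String)) : List String → String
  | [] =>
      match PySem.List.sorted2 hashes Prod.fst Prod.snd false with
      | [] => ""                           -- `if sorted_hashes:` fails: preferred_hash stays ""
      | (a, v) :: _ => a ++ ":" ++ v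
  | alg :: rest =>
      if d.contains alg then alg ++ ":" ++ ((d.get? alg).getD "")   -- lookup guarded by `in`
      else pvAFind d hashes rest

def pvTruthy (o : Option String) : Bool := !(o.getD "").isEmpty   -- Python truthiness of Optional[str]

def identity_for_py (purl : Option String) (version : Option String) (hashes : List (String × String)) : String × String × String :=
  let d := PySem.Dict.mk hashes
  let preferred_hash := if hashes.isEmpty then "" else pvAFind d hashes pvOrder
  if pvTruthy purl && pvTruthy version then (purl.getD "", version.getD "", "")
  else if pvTruthy purl then (purl.getD "", "", preferred_hash)
  else if !preferred_hash.isEmpty then ("", "", preferred_hash)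
  else ("", version.getD "", "")

-- ===== PORT B =====
def pvRank (a : String) : Nat := (PySem.List.index? pvOrder a).getD pvOrder.length

def identity_for_py_alt (purl : Option String) (version : Option String) (hashes : List (String × String)) : String × String × String :=
  let preferred_hash :=
    match PySem.List.min2? hashes (fun kv => pvRank kv.1) (fun kv => kv.1) with
    | none => ""
    | some (a, v) => a ++ ":" ++ v
  if pvTruthy purl && pvTruthy version then (purl.getD "", version.getD "", "")
  else if pvTruthy purl then (purl.getD "", "", preferred_hash)
  else if !preferred_hash.isEmpty then ("", "", preferred_hash)
  else ("", version.getD "", "")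

-- ===== PRECONDITION & SPEC =====
-- Pre_ requires distinct algorithm names: the Python parameter is a Mapping, whose items
-- never repeat a key, so this excludes no input the Python function can receive.
def Pre_identity_for_py (purl : Option String) (version : Option String) (hashes : List (String × String)) : Prop :=
  (hashes.map Prod.fst).Nodup
instance (purl : Option String) (version : Option String) (hashes : List (String × String)) : Decidable (Pre_identity_for_py purl version hashes) := by unfold Pre_identity_for_py; infer_instance

def pvWitness_identity_for_py : Option String × Option String × (List (String × String)) :=
  (some "pkg:pypi/demo", none, [("MD5", "aa"), ("SHA256", "bb"), ("ZZZ", "cc")])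

def Spec_identity_for_py (purl : Option String) (version : Option String) (hashes : List (String × String)) (out : String × String × String) : Prop := out = identity_for_py_alt purl version hashes
instance (purl : Option String) (version : Option String) (hashes : List (String × String)) (out : String × String × String) : Decidable (Spec_identity_for_py purl version hashes out) := by unfold Spec_identity_for_py; infer_instance

-- ===== CLAIM (what is proved, stated in full; the proofs are below) =====
def Claim_equal_identity_for_py : Prop := ∀ (purl : Option String) (version : Option String) (hashes : List (String × String)), Dom_identity_for_py purl version hashes → Pre_identity_for_py purl version hashes → Spec_identity_for_py purl version hashes (identity_for_py purl version hashes)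

-- ===== LEMMAS AND PROOFS =====

-- Python's lexicographic strict order on the composite key (pvRank ·.1, ·.1)
def pvR (x y : String × String) : Prop :=
  pvRank x.1 < pvRank y.1 ∨ (pvRank x.1 = pvRank y.1 ∧ x.1 < y.1)

-- the comparator Bool used by min2?/sorted2 for keys k1, k2
def pvLt {α κ₁ κ₂ : Type} [LinearOrder κ₁] [LinearOrder κ₂] (k1 : α → κ₁) (k2 : α → κ₂) (x m : α) : Bool :=
  decide (k1 x < k1 m) || (!decide (k1 m < k1 x) && decide (k2 x < k2 m))

lemma pvR_trans {x y z : String × String} (h1 : pvR x y) (h2 : pvR y z) : pvR x z := by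
  unfold pvR at *; rcases h1 with h1 | ⟨h1, h1'⟩ <;> rcases h2 with h2 | ⟨h2, h2'⟩
  · exact Or.inl (h1.trans h2)
  · exact Or.inl (h2 ▸ h1)
  · exact Or.inl (h1 ▸ h2)
  · exact Or.inr ⟨h1.trans h2, h1'.trans h2'⟩

-- existence of a strict minimum when the names are distinct
lemma pv_exists_min : ∀ (xs : List (String × String)), xs ≠ [] → (xs.map Prod.fst).Nodup →
    ∃ m ∈ xs, ∀ y ∈ xs, y ≠ m → pvR m y := by
  intro xs
  induction xs with
  | nil => intro h; exact absurd rfl h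
  | cons x t ih =>
    intro _ hnd
    rcases List.eq_nil_or_concat' t with rfl | _
    · exact ⟨x, by simp, by simp⟩
    · have hndt : (t.map Prod.fst).Nodup := (List.nodup_cons.mp hnd).2
      have hxt : x.1 ∉ t.map Prod.fst := (List.nodup_cons.mp hnd).1
      have ht : t ≠ [] := by rintro rfl; simp_all
      obtain ⟨m, hm, hmin⟩ := ih ht hndt
      have hx1 : x.1 ≠ m.1 := by
        intro h; exact hxt (h ▸ List.mem_map_of_mem hm)
      have htot : pvR x m ∨ pvR m x := by
        unfold pvR
        rcases lt_trichotomy (pvRank x.1) (pvRank m.1) with h | h | h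
        · exact Or.inl (Or.inl h)
        · rcases lt_or_gt_of_ne hx1 with h' | h'
          · exact Or.inl (Or.inr ⟨h, h'⟩)
          · exact Or.inr (Or.inr ⟨h.symm, h'⟩)
        · exact Or.inr (Or.inl h)
      rcases htot with hxm | hmx
      · refine ⟨x, List.mem_cons_self, ?_⟩
        intro y hy hne
        rcases List.mem_cons.mp hy with rfl | hy
        · exact absurd rfl hne
        · by_cases hym : y = m
          · exact hym ▸ hxm
          · exact pvR_trans hxm (hmin y hy hym)
      · refine ⟨m, List.mem_cons_of_mem _ hm, ?_⟩
        intro y hy hne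
        rcases List.mem_cons.mp hy with rfl | hy
        · exact hmx
        · exact hmin y hy hne

-- min2?'s fold step, named
def pvStep {α κ₁ κ₂ : Type} [LinearOrder κ₁] [LinearOrder κ₂] (k1 : α → κ₁) (k2 : α → κ₂)
    (acc : Option α) (x : α) : Option α :=
  match acc with
  | none => some x
  | some w => if pvLt k1 k2 x w = true then some x else some w

-- min2?'s fold returns the strict minimum (first-wins ties never arise)
lemma pv_foldl_min {α κ₁ κ₂ : Type} [LinearOrder κ₁] [LinearOrder κ₂] (k1 : α → κ₁) (k2 : α → κ₂) (m : α) :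
    ∀ (t : List α) (a : α), (m = a ∨ m ∈ t) →
      (∀ y, (y = a ∨ y ∈ t) → y ≠ m → pvLt k1 k2 m y = true ∧ pvLt k1 k2 y m = false) →
      t.foldl (pvStep k1 k2) (some a) = some m := by
  intro t
  induction t with
  | nil =>
    intro a hmem _
    rcases hmem with rfl | h
    · rfl
    · exact absurd h (List.not_mem_nil)
  | cons x t ih =>
    intro a hmem hlt
    rw [List.foldl_cons]
    by_cases hxa : pvLt k1 k2 x a = true
    · rw [show pvStep k1 k2 (some a) x = some x from by simp [pvStep, hxa]]
      apply ih
      · rcases hmem with rfl | hm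
        · by_cases hxm : x = m
          · exact Or.inl hxm.symm
          · have h2 := (hlt x (Or.inr List.mem_cons_self) hxm).2
            rw [h2] at hxa; simp at hxa
        · rcases List.mem_cons.mp hm with rfl | hm
          · exact Or.inl rfl
          · exact Or.inr hm
      · intro y hy hne
        refine hlt y ?_ hne
        rcases hy with rfl | hy
        · exact Or.inr List.mem_cons_self
        · exact Or.inr (List.mem_cons_of_mem _ hy)
    · rw [show pvStep k1 k2 (some a) x = some a from by simp [pvStep, hxa]]
      apply ih
      · rcases hmem with rfl | hm
        · exact Or.inl rfl
        · rcases List.mem_cons.mp hm with rfl | hm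
          · by_cases ham : a = m
            · exact Or.inl ham.symm
            · exact absurd ((hlt a (Or.inl rfl) ham).1) hxa
          · exact Or.inr hm
      · intro y hy hne
        refine hlt y ?_ hne
        rcases hy with rfl | hy
        · exact Or.inl rfl
        · exact Or.inr (List.mem_cons_of_mem _ hy)

lemma pv_min2?_eq {α κ₁ κ₂ : Type} [LinearOrder κ₁] [LinearOrder κ₂] (k1 : α → κ₁) (k2 : α → κ₂)
    (xs : List α) (m : α) (hm : m ∈ xs)
    (hlt : ∀ y ∈ xs, y ≠ m → pvLt k1 k2 m y = true ∧ pvLt k1 k2 y m = false) :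
    PySem.List.min2? xs k1 k2 = some m := by
  have hrw : PySem.List.min2? xs k1 k2 = xs.foldl (pvStep k1 k2) none := rfl
  rw [hrw]
  cases xs with
  | nil => exact absurd hm (List.not_mem_nil)
  | cons x t =>
    rw [List.foldl_cons]
    rw [show pvStep k1 k2 none x = some x from rfl]
    apply pv_foldl_min
    · rcases List.mem_cons.mp hm with rfl | h
      · exact Or.inl rfl
      · exact Or.inr h
    · intro y hy hne
      refine hlt y ?_ hne
      rcases hy with rfl | hy
      · exact List.mem_cons_self
      · exact List.mem_cons_of_mem _ hy

-- head of the insertion sort = the min2? fold (stability: first minimal element)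
lemma pv_head_insertFold {α : Type} (bf : α → α → Bool) :
    ∀ (xs : List α) (acc : List α),
      (xs.foldl (fun a x => PySem.List.insertBy bf x a) acc).head? =
      xs.foldl (fun o x =>
        match o with
        | none => some x
        | some w => if bf x w = true then some x else some w) acc.head? := by
  intro xs
  induction xs with
  | nil => intro acc; rfl
  | cons x t ih =>
    intro acc
    simp only [List.foldl_cons]
    rw [ih]
    congr 1
    cases acc with
    | nil => rfl
    | cons y ys =>
      show (PySem.List.insertBy bf x (y :: ys)).head? = _
      simp only [PySem.List.insertBy]
      by_cases h : bf x y = true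
      · simp [h]
      · simp [h]

lemma pv_head_sorted2 {α κ₁ κ₂ : Type} [LinearOrder κ₁] [LinearOrder κ₂] (k1 : α → κ₁) (k2 : α → κ₂)
    (xs : List α) :
    (PySem.List.sorted2 xs k1 k2 false).head? = PySem.List.min2? xs k1 k2 := by
  show (xs.foldl (fun a x => PySem.List.insertBy _ x a) []).head? = _
  rw [pv_head_insertFold]
  rfl

-- A's loop finds the first listed contained algorithm
lemma pvAFind_found (d : PySem.Dict String String) (hashes : List (String × String)) :
    ∀ (pre suf : List String) (a : String),
      (∀ b ∈ pre, d.contains b = false) → d.contains a = true →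
      pvAFind d hashes (pre ++ a :: suf) = a ++ ":" ++ ((d.get? a).getD "") := by
  intro pre
  induction pre with
  | nil => intro suf a _ ha; simp [pvAFind, ha]
  | cons b t ih =>
    intro suf a hpre ha
    have hb : d.contains b = false := hpre b List.mem_cons_self
    simp only [List.cons_append, pvAFind, hb]
    simp only [Bool.false_eq_true, if_false]
    exact ih suf a (fun c hc => hpre c (List.mem_cons_of_mem _ hc)) ha

lemma pvAFind_none (d : PySem.Dict String String) (hashes : List (String × String)) :
    ∀ (l : List String), (∀ b ∈ l, d.contains b = false) →
      pvAFind d hashes l = pvAFind d hashes [] := by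
  intro l
  induction l with
  | nil => intro _; rfl
  | cons b t ih =>
    intro h
    have hb : d.contains b = false := h b List.mem_cons_self
    simp only [pvAFind, hb, Bool.false_eq_true, if_false]
    exact ih (fun c hc => h c (List.mem_cons_of_mem _ hc))

lemma pvRank_le (a : String) : pvRank a ≤ 6 := by
  unfold pvRank
  cases h : PySem.List.index? pvOrder a with
  | none => simp [pvOrder]
  | some k =>
    rw [PySem.List.index?_eq_some_iff] at h
    obtain ⟨pre, suf, h1, h2, _⟩ := h
    have h6 : (6 : Nat) = pre.length + (suf.length + 1) := by
      rw [show (6 : Nat) = pvOrder.length from rfl, h1]; simp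
    simp only [Option.getD_some]
    omega

-- d = Dict.mk hashes facts under Nodup keys
lemma pv_mem_get? (hashes : List (String × String)) (hnd : (hashes.map Prod.fst).Nodup)
    (m : String × String) (hm : m ∈ hashes) :
    (PySem.Dict.mk hashes).get? m.1 = some m.2 := by
  apply PySem.Dict.get?_of_mem_items
  · exact hm
  · simpa [PySem.Dict.keys] using hnd

lemma pvRank_lt_of_mem {b : String} (hb : b ∈ pvOrder) : pvRank b < 6 := by
  simp only [pvOrder, List.mem_cons, List.not_mem_nil, or_false] at hb
  rcases hb with rfl | rfl | rfl | rfl | rfl | rfl <;> decide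

lemma pv_contains_mem (hashes : List (String × String)) {b : String}
    (hc : (PySem.Dict.mk hashes).contains b = true) : ∃ v, (b, v) ∈ hashes := by
  rw [PySem.Dict.contains_eq_isSome_get?, Option.isSome_iff_exists] at hc
  obtain ⟨v, hv⟩ := hc
  exact ⟨v, PySem.Dict.mem_items_of_get?_eq_some _ hv⟩

lemma pv_mem_contains (hashes : List (String × String)) {m : String × String} (hm : m ∈ hashes)
    (hnd : (hashes.map Prod.fst).Nodup) : (PySem.Dict.mk hashes).contains m.1 = true := by
  rw [PySem.Dict.contains_eq_isSome_get?, pv_mem_get? hashes hnd m hm]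
  rfl

-- the main lemma: the two preferred-hash computations agree
lemma pv_preferred_eq (hashes : List (String × String)) (hnd : (hashes.map Prod.fst).Nodup) :
    (if hashes.isEmpty then "" else pvAFind (PySem.Dict.mk hashes) hashes pvOrder) =
    (match PySem.List.min2? hashes (fun kv => pvRank kv.1) (fun kv => kv.1) with
     | none => ""
     | some (a, v) => a ++ ":" ++ v) := by
  cases hashes with
  | nil => rfl
  | cons h0 t =>
    obtain ⟨m, hm, hmin⟩ := pv_exists_min (h0 :: t) (by simp) hnd
    -- B's min2? picks m
    have hltB : ∀ y ∈ h0 :: t, y ≠ m →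
        pvLt (fun kv : String × String => pvRank kv.1) (fun kv => kv.1) m y = true ∧
        pvLt (fun kv : String × String => pvRank kv.1) (fun kv => kv.1) y m = false := by
      intro y hy hne
      rcases hmin y hy hne with h | ⟨h1, h2⟩
      · constructor <;> simp [pvLt, h, Nat.not_lt_of_gt h]
      · constructor <;> simp [pvLt, h1, h2, asymm h2]
    have hminB := pv_min2?_eq (fun kv : String × String => pvRank kv.1) (fun kv => kv.1) (h0 :: t) m hm hltB
    rw [hminB]
    obtain ⟨ma, mv⟩ := m
    simp only [List.isEmpty_cons, Bool.false_eq_true, if_false]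
    by_cases hr : pvRank ma < 6
    · -- some preferred algorithm is present; A's loop stops at ma = ORDER[rank ma]
      have hidx : PySem.List.index? pvOrder ma = some (pvRank ma) := by
        unfold pvRank
        cases h : PySem.List.index? pvOrder ma with
        | none => unfold pvRank at hr; rw [h] at hr; simp [pvOrder] at hr
        | some k => rfl
      obtain ⟨pre, suf, h1, h2, hnp⟩ := (PySem.List.index?_eq_some_iff _ _ _).mp hidx
      have hpre : ∀ b ∈ pre, (PySem.Dict.mk (h0 :: t)).contains b = false := by
        intro b hb
        by_contra hcb
        rw [Bool.not_eq_false] at hcb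
        obtain ⟨v, hv⟩ := pv_contains_mem _ hcb
        have hbne : (b, v) ≠ (ma, mv) := by
          intro he; exact hnp (by rw [← show b = ma from congrArg Prod.fst he]; exact hb)
        have hRy := hmin (b, v) hv hbne
        -- rank of b is its index in pre, strictly below rank ma
        have hib : PySem.List.index? pvOrder b = PySem.List.index? pre b := by
          rw [h1, PySem.List.index?_append_of_mem _ hb]
        obtain ⟨j, hj⟩ := (PySem.List.index?_isSome_iff _ _).mpr hb |> Option.isSome_iff_exists.mp
        obtain ⟨p2, s2, hb1, hb2, _⟩ := (PySem.List.index?_eq_some_iff _ _ _).mp hj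
        have hjlt : j < pre.length := by rw [hb1]; simp [← hb2]
        have hrb : pvRank b = j := by unfold pvRank; rw [hib, hj]; rfl
        have hfa : pvRank ((ma, mv) : String × String).1 = pvRank ma := rfl
        have hfb : pvRank ((b, v) : String × String).1 = pvRank b := rfl
        rcases hRy with h | ⟨h, _⟩ <;> rw [hfa, hfb] at h <;> omega
      have hcont : (PySem.Dict.mk (h0 :: t)).contains ma = true :=
        pv_mem_contains _ hm hnd
      rw [show pvOrder = pre ++ ma :: suf from h1,
        pvAFind_found _ _ pre suf ma hpre hcont,
        pv_mem_get? _ hnd (ma, mv) hm]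
      rfl
    · -- no preferred algorithm present: A falls back to the head of the sorted items
      have hr6 : pvRank ma = 6 := le_antisymm (pvRank_le ma) (le_of_not_gt hr)
      have hno : ∀ b ∈ pvOrder, (PySem.Dict.mk (h0 :: t)).contains b = false := by
        intro b hb
        by_contra hcb
        rw [Bool.not_eq_false] at hcb
        obtain ⟨v, hv⟩ := pv_contains_mem _ hcb
        have hrb : pvRank b < 6 := pvRank_lt_of_mem hb
        have hfa : pvRank ((ma, mv) : String × String).1 = pvRank ma := rfl
        have hfb : pvRank ((b, v) : String × String).1 = pvRank b := rfl
        by_cases he : (b, v) = (ma, mv)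
        · have hba : b = ma := congrArg Prod.fst he
          rw [hba] at hrb; omega
        · rcases hmin (b, v) hv he with h | ⟨h, _⟩ <;> rw [hfa, hfb] at h <;> omega
      rw [pvAFind_none _ _ pvOrder hno]
      -- the fallback head is m as well
      have hltA : ∀ y ∈ h0 :: t, y ≠ (ma, mv) →
          pvLt (Prod.fst (α := String) (β := String)) Prod.snd (ma, mv) y = true ∧
          pvLt (Prod.fst (α := String) (β := String)) Prod.snd y (ma, mv) = false := by
        intro y hy hne
        have hlty : ma < y.1 := by
          rcases hmin y hy hne with h | ⟨_, h2⟩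
          · have h5 := pvRank_le y.1
            have hfa : pvRank ((ma, mv) : String × String).1 = pvRank ma := rfl
            rw [hfa] at h; omega
          · exact h2
        constructor <;> simp [pvLt, hlty, asymm hlty]
      have hminA := pv_min2?_eq (Prod.fst (α := String) (β := String)) Prod.snd (h0 :: t) (ma, mv) hm hltA
      have hhead := pv_head_sorted2 (Prod.fst (α := String) (β := String)) Prod.snd (h0 :: t)
      rw [hminA] at hhead
      show (match PySem.List.sorted2 (h0 :: t) Prod.fst Prod.snd false with
            | [] => ""
            | (a, v) :: _ => a ++ ":" ++ v) = ma ++ ":" ++ mv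
      cases hs : PySem.List.sorted2 (h0 :: t) (Prod.fst (α := String) (β := String)) Prod.snd false with
      | nil => rw [hs] at hhead; simp at hhead
      | cons p rest =>
        rw [hs] at hhead
        simp only [List.head?_cons, Option.some.injEq] at hhead
        rw [hhead]

-- ===== VERDICT (by name: the statement is the Claim_ definition above) =====
theorem identity_for_py_spec : Claim_equal_identity_for_py := by
  intro purl version hashes _ hpre
  unfold Spec_identity_for_py identity_for_py identity_for_py_alt
  have h := pv_preferred_eq hashes hpre
  simp only [h]
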